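-- pv_equiv track=rewrite | github.com/BekaValentine/RetroUI | src/retroui/terminal/tabview.py | fill_titles_into_tabs_width
-- ===== SOURCE A (Python) =====
-- import math
--
-- def fill_titles_into_tabs_width(titles, width, style):
--     # type: (List[str], int, str) -> List[str]
--     """
--     Pads the size of the titles until their tabs would fill the given width,
--     and aligns the text to the given style's alignment.
--     """
--
--     next_to_increment = 0
--     while True:
--         aggregate_tabs_width = sum(
--             [len(title) + 2 for title in titles]) + len(titles) - 1
--
--         if aggregate_tabs_width >= width:
--             break
--
--         if style == 'fill_align_left':
--             titles[next_to_increment] += ' '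
--         elif style == 'fill_align_right':
--             titles[next_to_increment] = ' ' + titles[next_to_increment]
--         elif style == 'fill_align_center':
--             new_len = len(titles[next_to_increment]) + 1
--             bare = titles[next_to_increment].strip()
--             pre = math.floor(0.5 * (new_len - len(bare)))
--             post = new_len - len(bare) - pre
--             titles[next_to_increment] = pre * ' ' + bare + post * ' '
--         next_to_increment = (next_to_increment + 1) % len(titles)
--
--     return titles
-- ===== SOURCE B (Python) =====
-- def fill_titles_into_tabs_width(titles, width, style):
--     # type: (List[str], int, str) -> List[str]
--     """
--     Pads the size of the titles until their tabs would fill the given width,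
--     and aligns the text to the given style's alignment.
--
--     Computes each title's share of the deficit directly (round-robin
--     distribution via divmod) and builds every string once, rather than
--     growing the titles one space at a time. Mutates `titles` in place
--     like the original.
--     """
--     n = len(titles)
--     if n == 0:
--         return titles
--     deficit = width - (sum(len(t) for t in titles) + 3 * n - 1)
--     if deficit <= 0:
--         return titles
--     base, extra = divmod(deficit, n)
--     out = []
--     for i, t in enumerate(titles):
--         c = base + (1 if i < extra else 0)
--         if style == 'fill_align_left':
--             t = t + c * ' '
--         elif style == 'fill_align_right':
--             t = c * ' ' + t
--         elif style == 'fill_align_center' and c > 0: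
--             bare = t.strip()
--             pad = len(t) + c - len(bare)
--             pre = pad // 2
--             t = pre * ' ' + bare + (pad - pre) * ' '
--         out.append(t)
--     titles[:] = out
--     return titles
-- ===== Notes on version B (the rewrite author's own statement) =====
-- stated objective: alternative
-- what changed: A grows the titles one space at a time in a round-robin while-loop that re-sums the aggregate width every iteration; B computes the deficit once, distributes it round-robin arithmetically (divmod) into a per-title space count, and builds each padded string in one pass.
import Mathlib
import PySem

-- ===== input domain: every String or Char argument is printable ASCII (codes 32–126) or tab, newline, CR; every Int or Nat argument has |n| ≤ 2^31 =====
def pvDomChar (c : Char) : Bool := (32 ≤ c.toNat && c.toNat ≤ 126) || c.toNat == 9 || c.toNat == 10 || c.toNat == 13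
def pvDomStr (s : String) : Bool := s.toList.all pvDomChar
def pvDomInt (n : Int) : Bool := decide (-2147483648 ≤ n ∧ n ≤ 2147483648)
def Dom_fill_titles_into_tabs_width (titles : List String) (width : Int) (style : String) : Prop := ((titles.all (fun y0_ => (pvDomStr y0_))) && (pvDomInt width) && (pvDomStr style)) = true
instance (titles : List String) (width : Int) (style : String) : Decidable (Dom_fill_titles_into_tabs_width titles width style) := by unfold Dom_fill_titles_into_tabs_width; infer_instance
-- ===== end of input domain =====

-- B replaces A's one-space-at-a-time round-robin loop by a direct round-robin distribution of the
-- whole deficit (each title's padding count computed once by divmod, each string built once); the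
-- equivalence proved is about the return value (in Python both A and B also mutate `titles` in
-- place to the same list).

-- ===== PORT A =====
-- aggregate_tabs_width = sum([len(title) + 2 for title in titles]) + len(titles) - 1
def pvAgg (ts : List String) : Int :=
  (ts.map (fun t => PySem.Str.len t + 2)).sum + ts.length - 1

-- the body of one padding step on titles[next_to_increment] (the if/elif chain; no-op else)
def pvStepA (style : String) (t : String) : String :=
  if style == "fill_align_left" then String.ofList (t.toList ++ [' '])
  else if style == "fill_align_right" then String.ofList (' ' :: t.toList)
  else if style == "fill_align_center" then
    let new_len : Int := PySem.Str.len t + 1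
    let bare := PySem.Str.strip t
    let pre := PySem.Int.floordiv (new_len - PySem.Str.len bare) 2
    let post := new_len - PySem.Str.len bare - pre
    -- pre * ' ' + bare + post * ' '  (k * ' ' = replicate k.toNat ' ', empty for k ≤ 0)
    String.ofList (List.replicate pre.toNat ' ' ++ bare.toList ++ List.replicate post.toNat ' ')
  else t

-- the while-loop; each padding step grows aggregate_tabs_width by exactly 1, so the fuel
-- (width - pvAgg titles).toNat counts Python's iterations exactly (a guard for totality only)
def pvLoopA (width : Int) (style : String) : Nat → List String → Nat → List String
  | 0, ts, _ => ts
  | fuel + 1, ts, next =>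
      if pvAgg ts ≥ width then ts
      else pvLoopA width style fuel
            (ts.set next (pvStepA style (ts.getD next "")))
            ((next + 1) % ts.length)

def fill_titles_into_tabs_width (titles : List String) (width : Int) (style : String) : List String :=
  pvLoopA width style (width - pvAgg titles).toNat titles 0

-- ===== PORT B =====
-- pad one title with its pre-computed share c of the deficit (Source B's loop body)
def pvPadB (style : String) (c : Int) (t : String) : String :=
  if style == "fill_align_left" then String.ofList (t.toList ++ List.replicate c.toNat ' ')
  else if style == "fill_align_right" then String.ofList (List.replicate c.toNat ' ' ++ t.toList)
  else if style = "fill_align_center" ∧ 0 < c then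
    let bare := PySem.Str.strip t
    let pad := PySem.Str.len t + c - PySem.Str.len bare
    let pre := PySem.Int.floordiv pad 2
    String.ofList (List.replicate pre.toNat ' ' ++ bare.toList ++ List.replicate (pad - pre).toNat ' ')
  else t

def fill_titles_into_tabs_width_alt (titles : List String) (width : Int) (style : String) : List String :=
  if titles.length = 0 then titles
  else
    let n : Int := titles.length
    let deficit := width - ((titles.map PySem.Str.len).sum + 3 * n - 1)
    if deficit ≤ 0 then titles
    else
      let base := PySem.Int.floordiv deficit n
      let extra := PySem.Int.mod deficit n
      (PySem.List.enumerate titles).map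
        (fun p => pvPadB style (base + if p.1 < extra then 1 else 0) p.2)

-- ===== PRECONDITION & SPEC =====
-- Pre_ excludes exactly the inputs on which Python A does not return: empty `titles` with
-- width > -1 (IndexError/ZeroDivisionError) and an unknown style whose aggregate tabs width
-- is below `width` (the while-loop never makes progress and diverges).
def Pre_fill_titles_into_tabs_width (titles : List String) (width : Int) (style : String) : Prop :=
  (titles ≠ [] ∨ width ≤ -1) ∧
  (style = "fill_align_left" ∨ style = "fill_align_right" ∨ style = "fill_align_center" ∨
    width ≤ (titles.map (fun t => PySem.Str.len t + 2)).sum + titles.length - 1)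

instance (titles : List String) (width : Int) (style : String) :
    Decidable (Pre_fill_titles_into_tabs_width titles width style) := by
  unfold Pre_fill_titles_into_tabs_width; infer_instance

def pvWitness_fill_titles_into_tabs_width : List String × Int × String :=
  (["ab", "c"], 15, "fill_align_left")

def Spec_fill_titles_into_tabs_width (titles : List String) (width : Int) (style : String) (out : List String) : Prop := out = fill_titles_into_tabs_width_alt titles width style
instance (titles : List String) (width : Int) (style : String) (out : List String) : Decidable (Spec_fill_titles_into_tabs_width titles width style out) := by unfold Spec_fill_titles_into_tabs_width; infer_instance

-- ===== CLAIM (what is proved, stated in full; the proofs are below) =====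
def Claim_equal_fill_titles_into_tabs_width : Prop := ∀ (titles : List String) (width : Int) (style : String), Dom_fill_titles_into_tabs_width titles width style → Pre_fill_titles_into_tabs_width titles width style → Spec_fill_titles_into_tabs_width titles width style (fill_titles_into_tabs_width titles width style)

-- ===== LEMMAS AND PROOFS =====
def pvCount (d n next i : Nat) : Nat := (d + (n - 1) - ((i + n - next) % n)) / n

theorem pvOffset_eq (n next i : Nat) (hn : next < n) (hi : i < n) :
    (i + n - next) % n = if next ≤ i then i - next else i + n - next := by
  split_ifs with h
  · have e : i + n - next = (i - next) + n := by omega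
    rw [e, Nat.add_mod_right, Nat.mod_eq_of_lt (by omega)]
  · exact Nat.mod_eq_of_lt (by omega)

theorem pvCount_zero (d n next i : Nat) (hn : 0 < n) (hd : d = 0) :
    pvCount d n next i = 0 := by
  subst hd
  have h : (i + n - next) % n < n := Nat.mod_lt _ hn
  exact Nat.div_eq_of_lt (by omega)

theorem pvCount_succ_self (d n next : Nat) (hn : next < n) :
    pvCount (d + 1) n next next = pvCount d n ((next + 1) % n) next + 1 := by
  have h0 : (next + n - next) % n = 0 := by
    rw [show next + n - next = n by omega, Nat.mod_self]
  have h1 : (next + n - (next + 1) % n) % n = n - 1 := by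
    rcases Nat.lt_or_ge (next + 1) n with h | h
    · rw [Nat.mod_eq_of_lt h, pvOffset_eq n (next+1) next h hn, if_neg (by omega)]
      omega
    · rw [show (next + 1) % n = 0 by rw [show next + 1 = n by omega]; exact Nat.mod_self n,
        Nat.sub_zero, Nat.add_mod_right, Nat.mod_eq_of_lt hn]
      omega
  unfold pvCount
  rw [h0, h1, show d + 1 + (n - 1) - 0 = d + n by omega, show d + (n - 1) - (n - 1) = d by omega,
    Nat.add_div_right _ (by omega)]

theorem pvCount_succ_other (d n next i : Nat) (hn : next < n) (hi : i < n) (hne : i ≠ next) :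
    pvCount (d + 1) n next i = pvCount d n ((next + 1) % n) i := by
  unfold pvCount
  rcases Nat.lt_or_ge (next + 1) n with h | h
  · rw [Nat.mod_eq_of_lt h, pvOffset_eq n next i hn hi, pvOffset_eq n (next+1) i h hi]
    rcases Nat.lt_or_ge i next with hlt | hge
    · rw [if_neg (by omega), if_neg (by omega)]
      congr 1; omega
    · rw [if_pos (by omega), if_pos (by omega)]
      congr 1; omega
  · rw [show (next + 1) % n = 0 by rw [show next + 1 = n by omega]; exact Nat.mod_self n,
      Nat.sub_zero, Nat.add_mod_right, Nat.mod_eq_of_lt hi, pvOffset_eq n next i hn hi,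
      if_neg (by omega)]
    congr 1; omega

theorem pvCount_closed (d n i : Nat) (hn : 0 < n) (hi : i < n) :
    pvCount d n 0 i = d / n + (if i < d % n then 1 else 0) := by
  unfold pvCount
  rw [Nat.sub_zero, Nat.add_mod_right, Nat.mod_eq_of_lt hi]
  have hdm := Nat.div_add_mod d n
  have hr : d % n < n := Nat.mod_lt _ hn
  set q := d / n with hq
  set r := d % n with hrr
  split_ifs with h
  · rw [show d + (n - 1) - i = n * q + ((r - 1 - i) + n) by omega, Nat.mul_add_div hn,
      Nat.add_div_right _ hn, Nat.div_eq_of_lt (by omega)]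
  · rw [show d + (n - 1) - i = n * q + (r + (n - 1) - i) by omega, Nat.mul_add_div hn,
      Nat.div_eq_of_lt (by omega)]


theorem pv_dropWhile_replicate_space (a : Nat) (xs : List Char) :
    (List.replicate a ' ' ++ xs).dropWhile PySem.Chars.isspace = xs.dropWhile PySem.Chars.isspace := by
  induction a with
  | zero => simp
  | succ a ih =>
      rw [List.replicate_succ, List.cons_append, List.dropWhile_cons_of_pos (by decide), ih]

theorem pv_rstrip_eq_rdropWhile (l : List Char) :
    PySem.Chars.rstrip l = List.rdropWhile PySem.Chars.isspace l := rfl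

theorem pv_rdropWhile_append_replicate (b : Nat) (xs : List Char) :
    List.rdropWhile PySem.Chars.isspace (xs ++ List.replicate b ' ')
      = List.rdropWhile PySem.Chars.isspace xs := by
  induction b with
  | zero => simp
  | succ b ih =>
      rw [List.replicate_succ' , ← List.append_assoc, List.rdropWhile_concat_pos _ _ _ (by decide), ih]

theorem pv_strip_pad (l : List Char) (a b : Nat) :
    PySem.Chars.strip (List.replicate a ' ' ++ PySem.Chars.strip l ++ List.replicate b ' ')
      = PySem.Chars.strip l := by
  have hm : PySem.Chars.strip l
      = List.rdropWhile PySem.Chars.isspace (List.dropWhile PySem.Chars.isspace l) := rfl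
  set p := PySem.Chars.isspace
  set u := List.dropWhile p l with hu
  set m := PySem.Chars.strip l with hmm
  -- m has no leading whitespace
  have hdu : List.dropWhile p u = u := by rw [hu]; exact List.dropWhile_idempotent p l
  have hpref : m <+: u := by rw [hm]; exact List.rdropWhile_prefix p u
  have hdm : List.dropWhile p m = m := by
    rw [List.dropWhile_eq_self_iff]
    intro hl
    have hlen : m.length ≤ u.length := hpref.length_le
    have hget : m[0] = u[0]'(by omega) := List.IsPrefix.getElem hpref (by omega)
    rw [hget]
    exact (List.dropWhile_eq_self_iff.mp hdu) (by omega)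
  -- m has no trailing whitespace
  have hrm : List.rdropWhile p m = m := by
    rw [hm, List.rdropWhile_idempotent]
  show PySem.Chars.rstrip (List.dropWhile p (List.replicate a ' ' ++ m ++ List.replicate b ' ')) = m
  rw [List.append_assoc, pv_dropWhile_replicate_space, List.dropWhile_append]
  rcases eq_or_ne m [] with hnil | hnil
  · rw [hnil]
    simp only [List.dropWhile_nil, List.isEmpty_nil, List.dropWhile_replicate]
    rw [if_pos (by decide)]
    rfl
  · rw [hdm, if_neg (by simpa using hnil), pv_rstrip_eq_rdropWhile,
      pv_rdropWhile_append_replicate, hrm]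

theorem pv_length_strip_le (l : List Char) :
    (PySem.Chars.strip l).length ≤ l.length := by
  have h1 : (PySem.Chars.strip l).length ≤ (List.dropWhile PySem.Chars.isspace l).length := by
    have := List.rdropWhile_prefix PySem.Chars.isspace (List.dropWhile PySem.Chars.isspace l)
    exact this.length_le
  exact le_trans h1 (List.length_dropWhile_le _ _)

theorem pv_len_step (style : String) (t : String)
    (hs : style = "fill_align_left" ∨ style = "fill_align_right" ∨ style = "fill_align_center") :
    PySem.Str.len (pvStepA style t) = PySem.Str.len t + 1 := by
  have hb : (PySem.Chars.strip t.toList).length ≤ t.toList.length := pv_length_strip_le t.toList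
  rcases hs with h | h | h <;> subst h
  · simp [pvStepA, PySem.Str.len_eq]
  · simp [pvStepA, PySem.Str.len_eq]
  · simp only [pvStepA, beq_iff_eq, String.reduceEq, reduceIte,
      PySem.Int.floordiv_eq_ediv_of_pos (show (0:Int) < 2 by norm_num),
      PySem.Str.len_eq, PySem.Str.toList_strip, String.toList_ofList,
      List.length_append, List.length_replicate]
    push_cast
    omega

theorem pv_strip_step_center (t : String) :
    PySem.Str.strip (pvStepA "fill_align_center" t) = PySem.Str.strip t := by
  have h : (PySem.Str.strip (pvStepA "fill_align_center" t)).toList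
      = (PySem.Str.strip t).toList := by
    simp only [PySem.Str.toList_strip, pvStepA, beq_iff_eq, String.reduceEq, reduceIte,
      String.toList_ofList]
    exact pv_strip_pad t.toList _ _
  rw [← String.ofList_toList (s := PySem.Str.strip (pvStepA "fill_align_center" t)), h,
    String.ofList_toList]

theorem pv_pad_zero (style : String) (t : String) : pvPadB style 0 t = t := by
  unfold pvPadB
  split_ifs with h1 h2 h3
  · simp
  · simp
  · exact absurd h3.2 (by norm_num)
  · rfl

theorem pv_pad_step (style : String) (c : Nat) (t : String)
    (hs : style = "fill_align_left" ∨ style = "fill_align_right" ∨ style = "fill_align_center") :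
    pvPadB style ((c : Int) + 1) t = pvPadB style (c : Int) (pvStepA style t) := by
  rcases hs with h | h | h <;> subst h
  · simp only [pvPadB, pvStepA, beq_iff_eq, reduceIte, String.toList_ofList]
    rw [show ((c:Int)+1).toNat = c + 1 by omega, show ((c:Int)).toNat = c by omega,
      List.replicate_succ, List.append_assoc]
    rfl
  · simp only [pvPadB, pvStepA, beq_iff_eq, String.reduceEq, reduceIte, String.toList_ofList]
    rw [show ((c:Int)+1).toNat = c + 1 by omega, show ((c:Int)).toNat = c by omega,
      List.replicate_succ']
    simp
  · rcases Nat.eq_zero_or_pos c with hc | hc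
    · subst hc
      rw [show ((0:Nat):Int) = 0 by norm_num, pv_pad_zero, zero_add]
      simp only [pvPadB, pvStepA, beq_iff_eq, String.reduceEq, reduceIte]
      rw [if_pos ⟨by trivial, by norm_num⟩]
    · have hlen := pv_len_step "fill_align_center" t (by tauto)
      have hstr := pv_strip_step_center t
      simp only [pvPadB, beq_iff_eq, String.reduceEq, reduceIte]
      rw [if_pos ⟨by trivial, by omega⟩, if_pos ⟨by trivial, by exact_mod_cast hc⟩]
      simp only [hstr, hlen]
      have e : PySem.Str.len t + 1 + (c:Int) - PySem.Str.len (PySem.Str.strip t)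
          = PySem.Str.len t + ((c:Int)+1) - PySem.Str.len (PySem.Str.strip t) := by ring
      rw [e]

theorem pv_sum_set (L : List Int) (n : Nat) (h : n < L.length) (a : Int) :
    (L.set n a).sum = L.sum - L[n] + a := by
  rw [List.sum_set, if_pos h]
  have hL : L.sum = (L.take n).sum + (L.drop n).sum := by
    rw [← List.sum_append, List.take_append_drop]
  have hd : L.drop n = L[n] :: L.drop (n + 1) := List.drop_eq_getElem_cons h
  rw [hd, List.sum_cons] at hL
  omega

theorem pv_agg_set (style : String) (ts : List String) (next : Nat) (h : next < ts.length)
    (hs : style = "fill_align_left" ∨ style = "fill_align_right" ∨ style = "fill_align_center") :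
    pvAgg (ts.set next (pvStepA style (ts.getD next ""))) = pvAgg ts + 1 := by
  unfold pvAgg
  rw [List.map_set, pv_sum_set _ next (by simpa using h), List.getElem_map,
    List.getD_eq_getElem ts "" h, pv_len_step style _ hs, List.length_set]
  ring

theorem pv_agg_eq (ts : List String) :
    pvAgg ts = (ts.map PySem.Str.len).sum + 3 * ts.length - 1 := by
  unfold pvAgg
  induction ts with
  | nil => simp
  | cons x xs ih =>
      simp only [List.map_cons, List.sum_cons, List.length_cons] at *
      push_cast at *
      omega

theorem pv_map_pad_zero (style : String) (ts : List String) (next : Nat) (hn : 0 < ts.length) :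
    (PySem.List.enumerate ts).map
        (fun p => pvPadB style ((pvCount 0 ts.length next p.1.toNat : Nat) : Int) p.2) = ts := by
  have h0 : ∀ i, pvCount 0 ts.length next i = 0 := fun i => pvCount_zero 0 ts.length next i hn rfl
  simp only [h0, Nat.cast_zero, pv_pad_zero]
  exact PySem.List.map_snd_enumerate ts 0

theorem pv_loopA_eq (width : Int) (style : String)
    (hs : style = "fill_align_left" ∨ style = "fill_align_right" ∨ style = "fill_align_center") :
    ∀ (F : Nat) (ts : List String) (next : Nat), 0 < ts.length → next < ts.length →
      (width - pvAgg ts).toNat ≤ F →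
      pvLoopA width style F ts next =
        (PySem.List.enumerate ts).map
          (fun p => pvPadB style ((pvCount (width - pvAgg ts).toNat ts.length next p.1.toNat : Nat) : Int) p.2) := by
  intro F
  induction F with
  | zero =>
      intro ts next hn hnext hF
      have hd : (width - pvAgg ts).toNat = 0 := Nat.le_zero.mp hF
      rw [hd, pv_map_pad_zero style ts next hn]
      rfl
  | succ F ih =>
      intro ts next hn hnext hF
      by_cases hbr : pvAgg ts ≥ width
      · have hd : (width - pvAgg ts).toNat = 0 := by omega
        rw [hd, pv_map_pad_zero style ts next hn]
        simp [pvLoopA, hbr]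
      · have hlt : pvAgg ts < width := by omega
        set t0 := ts.getD next "" with ht0
        set ts' := ts.set next (pvStepA style t0) with hts'
        have hlen' : ts'.length = ts.length := List.length_set
        have hagg : pvAgg ts' = pvAgg ts + 1 := pv_agg_set style ts next hnext hs
        set d' := (width - pvAgg ts').toNat with hd'
        have hd : (width - pvAgg ts).toNat = d' + 1 := by
          rw [hd', hagg]; omega
        have hnext' : (next + 1) % ts.length < ts.length := Nat.mod_lt _ hn
        have hgd : ts.getD next "" = ts[next] := List.getD_eq_getElem ts "" hnext
        have hsub : d' = (width - pvAgg (ts.set next (pvStepA style (ts.getD next "")))).toNat := by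
          rw [hd', hts', ht0]
        have hsub' : d' = (width - pvAgg (ts.set next (pvStepA style ts[next]))).toNat := by
          rw [hsub, hgd]
        have hstep : pvLoopA width style (F + 1) ts next
            = pvLoopA width style F ts' ((next + 1) % ts.length) := by
          simp only [pvLoopA, if_neg hbr, hts', ht0]
        rw [hstep, ih ts' ((next + 1) % ts.length) (by omega) (by rw [hlen']; exact hnext')
          (by rw [hagg]; omega)]
        apply List.ext_getElem
        · simp [hlen', PySem.List.length_enumerate]
        intro k h1 h2
        have hk : k < ts.length := by
          simpa [PySem.List.length_enumerate, hlen'] using h1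
        rw [List.getElem_map, List.getElem_map,
          PySem.List.getElem_enumerate ts' 0 k (by simp [PySem.List.length_enumerate, hlen']; omega),
          PySem.List.getElem_enumerate ts 0 k (by simp [PySem.List.length_enumerate]; omega)]
        simp only [zero_add, Int.toNat_natCast, hlen']
        simp only [hts', List.getElem_set]
        by_cases hkn : next = k
        · subst hkn
          rw [if_pos rfl, hd, pvCount_succ_self _ _ _ hnext]
          push_cast
          rw [pv_pad_step style _ _ hs, ht0, hgd, ← hsub']
        · rw [if_neg hkn, hd, pvCount_succ_other _ _ _ _ hnext hk (fun h => hkn h.symm)]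

-- ===== VERDICT (by name: the statement is the Claim_ definition above) =====
theorem fill_titles_into_tabs_width_spec : Claim_equal_fill_titles_into_tabs_width := by
  intro titles width style _hDom hPre
  unfold Spec_fill_titles_into_tabs_width fill_titles_into_tabs_width fill_titles_into_tabs_width_alt
  rcases Nat.eq_zero_or_pos titles.length with hn | hn
  · have htn : titles = [] := List.length_eq_zero_iff.mp hn
    subst htn
    have hw : width ≤ -1 := by
      rcases hPre.1 with h | h
      · exact absurd rfl h
      · exact h
    have h0 : (width - pvAgg []).toNat = 0 := by
      unfold pvAgg
      simp only [List.map_nil, List.sum_nil, List.length_nil]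
      omega
    rw [h0]
    rfl
  · rw [if_neg (by omega)]
    dsimp only
    have hagg := pv_agg_eq titles
    by_cases hd : width - ((titles.map PySem.Str.len).sum + 3 * (titles.length : Int) - 1) ≤ 0
    · rw [if_pos hd]
      have h0 : (width - pvAgg titles).toNat = 0 := by omega
      rw [h0]
      rfl
    · rw [if_neg hd]
      have hsty : style = "fill_align_left" ∨ style = "fill_align_right" ∨ style = "fill_align_center" := by
        rcases hPre.2 with h | h | h | h
        · tauto
        · tauto
        · tauto
        · have h' : width ≤ pvAgg titles := h
          omega
      rw [pv_loopA_eq width style hsty (width - pvAgg titles).toNat titles 0 hn hn (le_refl _)]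
      apply List.map_congr_left
      intro p hp
      rw [PySem.List.mem_enumerate_iff] at hp
      obtain ⟨k, hk, hpk⟩ := hp
      subst hpk
      dsimp only
      have hdpos : 0 < width - pvAgg titles := by omega
      set d := (width - pvAgg titles).toNat with hdd
      have hdefd : width - ((titles.map PySem.Str.len).sum + 3 * (titles.length : Int) - 1) = (d : Int) := by
        omega
      rw [hdefd, PySem.Int.floordiv_natCast, PySem.Int.mod_natCast]
      rw [show ((0 : Int) + (k : Int)).toNat = k by omega]
      rw [pvCount_closed d titles.length k hn hk]
      congr 1
      by_cases hke : k < d % titles.length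
      · rw [if_pos hke,
          if_pos (show (0:Int) + (k:Int) < ((d % titles.length : Nat) : Int) by push_cast; omega)]
        push_cast
        ring
      · rw [if_neg hke,
          if_neg (show ¬((0:Int) + (k:Int) < ((d % titles.length : Nat) : Int)) by push_cast; omega)]
        push_cast
        ring
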